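-- pv_equiv track=rewrite | github.com/bcgov/foi-docreviewer | computingservices/DocumentServices/services/dts/redactionsummary.py | get_sorted_original_pages_by_docid
-- ===== SOURCE A (Python) =====
-- def get_sorted_original_pages_by_docid(mapped_flags):
--     pages_by_docid = {}
--     for entry in mapped_flags:
--         docid = entry['docid']
--         original_page = entry['dbpageno']
--
--         if docid not in pages_by_docid:
--             pages_by_docid[docid] = []
--
--         pages_by_docid[docid].append(original_page)
--
--     # Sort the original pages for each docid
--     for docid in pages_by_docid:
--         pages_by_docid[docid].sort()
--
--     # Convert to the desired format
--     result = [{docid: pages} for docid, pages in pages_by_docid.items()]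
--     return result
-- ===== SOURCE B (Python) =====
-- def get_sorted_original_pages_by_docid(mapped_flags):
--     # Distinct docids in first-appearance order, then one filtering scan per docid.
--     docids = list(dict.fromkeys(entry['docid'] for entry in mapped_flags))
--     return [
--         {d: sorted(entry['dbpageno'] for entry in mapped_flags if entry['docid'] == d)}
--         for d in docids
--     ]
-- ===== Notes on version B (the rewrite author's own statement) =====
-- stated objective: alternative
-- what changed: Replaces the mutable grouping dict built in one pass (plus per-bucket in-place sorts and an items() conversion) by first computing the distinct docids in first-appearance order via dict.fromkeys and then one filtering rescan of the input per docid inside a comprehension.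
import Mathlib
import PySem

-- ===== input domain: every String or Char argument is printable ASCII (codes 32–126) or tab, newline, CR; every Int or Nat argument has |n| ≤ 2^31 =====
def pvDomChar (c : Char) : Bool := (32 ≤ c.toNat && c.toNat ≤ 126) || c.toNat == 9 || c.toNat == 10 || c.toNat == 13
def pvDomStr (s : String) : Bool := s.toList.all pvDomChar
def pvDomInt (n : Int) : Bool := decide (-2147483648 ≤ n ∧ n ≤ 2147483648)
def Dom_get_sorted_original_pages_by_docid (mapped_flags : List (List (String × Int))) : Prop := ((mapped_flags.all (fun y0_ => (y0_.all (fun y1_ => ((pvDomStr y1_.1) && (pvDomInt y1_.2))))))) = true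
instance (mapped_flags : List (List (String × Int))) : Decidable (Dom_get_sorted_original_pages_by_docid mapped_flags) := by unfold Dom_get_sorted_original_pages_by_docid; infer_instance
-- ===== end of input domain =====

-- B groups by rescanning the input once per distinct docid (dict.fromkeys order) instead of
-- building a mutable grouping dict in one pass; same return value, different traversal shape.

-- entry[k]: first-match association-list lookup (Python dict lookup); Pre_ guarantees the key
-- is present, so the 0 default is never the result on admitted inputs.
def pvLookup (e : List (String × Int)) (k : String) : Int :=
  ((PySem.Dict.mk e).get? k).getD 0

-- ===== PORT A =====
def get_sorted_original_pages_by_docid (mapped_flags : List (List (String × Int))) : List (List (Int × List Int)) :=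
  let pages_by_docid : PySem.Dict Int (List Int) :=
    mapped_flags.foldl (fun d entry =>
      let docid := pvLookup entry "docid"
      let original_page := pvLookup entry "dbpageno"
      let d' := if d.contains docid then d else d.insert docid ([] : List Int)
      d'.modify docid [] (fun l => l ++ [original_page])) PySem.Dict.empty
  let sortedD : PySem.Dict Int (List Int) :=
    pages_by_docid.keys.foldl (fun d docid =>
      d.modify docid [] (fun l => PySem.List.sorted l (fun x => x) false)) pages_by_docid
  sortedD.items.map (fun p => [(p.1, p.2)])

-- ===== PORT B =====
def get_sorted_original_pages_by_docid_alt (mapped_flags : List (List (String × Int))) : List (List (Int × List Int)) :=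
  let docids := PySem.List.dedup (mapped_flags.map (fun e => pvLookup e "docid"))
  docids.map (fun d =>
    [(d, PySem.List.sorted
          ((mapped_flags.filter (fun e => pvLookup e "docid" == d)).map
            (fun e => pvLookup e "dbpageno"))
          (fun x => x) false)])

-- ===== PRECONDITION & SPEC =====
-- Pre_ excludes exactly the inputs on which the Python A raises KeyError: an entry missing
-- the 'docid' or 'dbpageno' key (B raises there too).
def Pre_get_sorted_original_pages_by_docid (mapped_flags : List (List (String × Int))) : Prop :=
  ∀ e ∈ mapped_flags, "docid" ∈ e.map Prod.fst ∧ "dbpageno" ∈ e.map Prod.fst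
instance (mapped_flags : List (List (String × Int))) : Decidable (Pre_get_sorted_original_pages_by_docid mapped_flags) := by unfold Pre_get_sorted_original_pages_by_docid; infer_instance
def pvWitness_get_sorted_original_pages_by_docid : (List (List (String × Int))) :=
  [[("docid", 1), ("dbpageno", 4)], [("docid", 2), ("dbpageno", 3)], [("docid", 1), ("dbpageno", 2)]]
def Spec_get_sorted_original_pages_by_docid (mapped_flags : List (List (String × Int))) (out : List (List (Int × List Int))) : Prop := out = get_sorted_original_pages_by_docid_alt mapped_flags
instance (mapped_flags : List (List (String × Int))) (out : List (List (Int × List Int))) : Decidable (Spec_get_sorted_original_pages_by_docid mapped_flags out) := by unfold Spec_get_sorted_original_pages_by_docid; infer_instance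

-- ===== CLAIM (what is proved, stated in full; the proofs are below) =====
def Claim_equal_get_sorted_original_pages_by_docid : Prop := ∀ (mapped_flags : List (List (String × Int))), Dom_get_sorted_original_pages_by_docid mapped_flags → Pre_get_sorted_original_pages_by_docid mapped_flags → Spec_get_sorted_original_pages_by_docid mapped_flags (get_sorted_original_pages_by_docid mapped_flags)

-- ===== LEMMAS AND PROOFS =====

-- Updating a set with elements it already has changes nothing.
theorem pv_set_update_self {α : Type} [BEq α] [LawfulBEq α] (xs s : List α)
    (h : ∀ x ∈ xs, x ∈ s) : PySem.Set.update s xs = s := by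
  induction xs generalizing s with
  | nil => exact PySem.Set.update_nil s
  | cons x xs ih =>
    simp only [PySem.Set.update, List.foldl_cons] at *
    have hx : PySem.Set.add s x = s := by
      simp [PySem.Set.add, List.contains_eq_mem, h x (by simp)]
    rw [hx]
    exact ih s (fun y hy => h y (by simp [hy]))

-- A's "setdefault-then-append" step is the single modify step.
theorem pv_step_eq (d : PySem.Dict Int (List Int)) (k : Int) (p : Int) :
    (if d.contains k then d else d.insert k ([] : List Int)).modify k [] (fun l => l ++ [p])
      = d.modify k [] (fun l => l ++ [p]) := by
  by_cases h : d.contains k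
  · simp [h]
  · simp only [Bool.not_eq_true] at h
    simp only [h, Bool.false_eq_true, if_false, PySem.Dict.modify,
      PySem.Dict.getD_insert_self, PySem.Dict.insert_insert_self]
    simp [PySem.Dict.getD_of_not_contains, h]

-- The sort loop: a modify at each of a Nodup list of keys, lookup afterwards.
theorem pv_foldl_modify_nodup {f : List Int → List Int} (ks : List Int)
    (d : PySem.Dict Int (List Int)) (c : Int) (hnd : ks.Nodup) :
    (ks.foldl (fun d k => d.modify k [] f) d).getD c []
      = if c ∈ ks then f (d.getD c []) else d.getD c [] := by
  induction ks generalizing d with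
  | nil => simp
  | cons k ks ih =>
    simp only [List.nodup_cons] at hnd
    simp only [List.foldl_cons, List.mem_cons]
    rw [ih _ hnd.2]
    by_cases hc : c = k
    · subst hc
      simp [hnd.1]
    · simp [hc, PySem.Dict.getD_modify]

-- ===== VERDICT (by name: the statement is the Claim_ definition above) =====
theorem get_sorted_original_pages_by_docid_spec : Claim_equal_get_sorted_original_pages_by_docid := by
  intro mapped_flags _ _
  unfold Spec_get_sorted_original_pages_by_docid
  unfold get_sorted_original_pages_by_docid get_sorted_original_pages_by_docid_alt
  simp only []
  set keyf : List (String × Int) → Int := fun e => pvLookup e "docid" with hkeyf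
  set valf : List (String × Int) → Int := fun e => pvLookup e "dbpageno" with hvalf
  -- the grouping fold equals the pure modify fold over (key, value) pairs
  have hbuild :
      mapped_flags.foldl (fun d entry =>
        let docid := pvLookup entry "docid"
        let original_page := pvLookup entry "dbpageno"
        let d' := if d.contains docid then d else d.insert docid ([] : List Int)
        d'.modify docid [] (fun l => l ++ [original_page])) PySem.Dict.empty
      = (mapped_flags.map (fun e => (keyf e, valf e))).foldl
          (fun d p => d.modify p.1 [] (fun l => l ++ [p.2])) PySem.Dict.empty := by
    rw [List.foldl_map]
    have hfun : (fun (d : PySem.Dict Int (List Int)) (entry : List (String × Int)) =>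
        let docid := pvLookup entry "docid"
        let original_page := pvLookup entry "dbpageno"
        let d' := if d.contains docid then d else d.insert docid ([] : List Int)
        d'.modify docid [] (fun l => l ++ [original_page]))
        = (fun d e => d.modify (keyf e) [] (fun l => l ++ [valf e])) := by
      funext d e
      exact pv_step_eq d (keyf e) (valf e)
    exact congrArg (fun f => List.foldl f PySem.Dict.empty mapped_flags) hfun
  set pairs := mapped_flags.map (fun e => (keyf e, valf e)) with hpairs
  set pages := pairs.foldl (fun d p => d.modify p.1 [] (fun l => l ++ [p.2])) PySem.Dict.empty with hpages
  rw [hbuild]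
  -- keys of the grouping dict
  have hkeys : pages.keys = PySem.Set.ofList (mapped_flags.map keyf) := by
    have := PySem.Dict.keys_foldl_modify_key pairs Prod.fst ([] : List Int)
      (fun _ p => fun l => l ++ [p.2]) PySem.Dict.empty
    rw [hpages]
    rw [this, PySem.Dict.keys_empty, PySem.Set.update_nil_left, hpairs, List.map_map]
    rfl
  have hnodup : pages.keys.Nodup := by
    rw [hkeys]; exact PySem.Set.nodup_ofList _
  -- values of the grouping dict
  have hgetD : ∀ c, pages.getD c [] = (pairs.filter (fun p => p.1 == c)).map (·.2) := by
    intro c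
    rw [hpages]
    simpa using PySem.Dict.getD_foldl_modify_append pairs PySem.Dict.empty c
  -- the sort loop
  set sortedD := pages.keys.foldl (fun d docid =>
      d.modify docid [] (fun l => PySem.List.sorted l (fun x => x) false)) pages with hsD
  have hkeysS : sortedD.keys = pages.keys := by
    rw [hsD]
    have := PySem.Dict.keys_foldl_modify_key pages.keys (fun k => k) ([] : List Int)
      (fun _ _ => fun l => PySem.List.sorted l (fun x => x) false) pages
    simp only [List.map_id'] at this
    rw [this]
    exact pv_set_update_self _ _ (fun x hx => hx)
  have hnodupS : sortedD.keys.Nodup := by rw [hkeysS]; exact hnodup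
  have hgetDS : ∀ c ∈ pages.keys, sortedD.getD c []
      = PySem.List.sorted (pages.getD c []) (fun x => x) false := by
    intro c hc
    rw [hsD, pv_foldl_modify_nodup _ _ _ hnodup, if_pos hc]
  -- assemble
  rw [PySem.Dict.items_eq_map_keys sortedD hnodupS ([] : List Int), hkeysS, hkeys,
      ← PySem.List.dedup_eq_ofList, List.map_map]
  apply List.map_congr_left
  intro k hk
  have hkmem : k ∈ pages.keys := by
    rw [hkeys, ← PySem.List.dedup_eq_ofList]; exact hk
  simp only [Function.comp_apply]
  rw [hgetDS k hkmem, hgetD k]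
  congr 2
  rw [hpairs, List.filter_map, List.map_map]
  rfl
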